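-- pv_equiv track=rewrite | github.com/chin123/pseudocode-parser | main.py | typeline
-- ===== SOURCE A (Python) =====
-- def typeline(curline):
-- 	i = curline.split()
-- 	if "for" in i:
-- 		return "for"
-- 	if "while" in i:
-- 		return "while"
-- 	if "do" in i:
-- 		return "do"
-- 	if "endif" in i:
-- 		return "endif"
-- 	for k in ["next", "endwhile", "endfunction", "endprocedure"]:
-- 		if k in i:
-- 			return "end"
-- 	if "endswitch" in i:
-- 		return "endswitch"
-- 	if "until" in i:
-- 		return "until"
-- 	if "if" in i:
-- 		return "if"
-- 	if "elseif" in i: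
-- 		return "if"
-- 	if "else" in i:
-- 		return "if"
-- 	if "switch" in i:
-- 		return "switch"
-- 	if "case" in i:
-- 		return "case"
-- 	for k in ["function", "procedure"]:
-- 		if k in i:
-- 			return "function"
-- 	if "array" in i:
-- 		return "array"
-- 	return "stmt"
-- ===== SOURCE B (Python) =====
-- KW = {
--     "for": (0, "for"), "while": (1, "while"), "do": (2, "do"),
--     "endif": (3, "endif"), "next": (4, "end"), "endwhile": (5, "end"),
--     "endfunction": (6, "end"), "endprocedure": (7, "end"),
--     "endswitch": (8, "endswitch"), "until": (9, "until"),
--     "if": (10, "if"), "elseif": (11, "if"), "else": (12, "if"),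
--     "switch": (13, "switch"), "case": (14, "case"),
--     "function": (15, "function"), "procedure": (16, "function"),
--     "array": (17, "array"),
-- }
--
-- def typeline(curline):
--     best = None
--     for w in curline.split():
--         hit = KW.get(w)
--         if hit is not None and (best is None or hit[0] < best[0]):
--             best = hit
--     return best[1] if best is not None else "stmt"
-- ===== Notes on version B (the rewrite author's own statement) =====
-- stated objective: alternative
-- what changed: Replaces the 18-branch chain of membership rescans over the word list with a keyword->(rank,category) dict and a single pass over the words keeping the hit of smallest rank.
import Mathlib
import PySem

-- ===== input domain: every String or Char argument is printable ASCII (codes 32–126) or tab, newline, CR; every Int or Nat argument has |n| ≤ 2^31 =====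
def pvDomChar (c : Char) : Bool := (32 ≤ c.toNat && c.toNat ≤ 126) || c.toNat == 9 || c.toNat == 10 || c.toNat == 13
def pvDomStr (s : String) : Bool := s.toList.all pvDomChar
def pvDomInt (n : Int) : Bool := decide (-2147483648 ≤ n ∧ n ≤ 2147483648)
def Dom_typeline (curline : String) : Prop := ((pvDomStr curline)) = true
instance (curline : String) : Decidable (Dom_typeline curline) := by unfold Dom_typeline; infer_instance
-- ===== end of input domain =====

-- B replaces A's 18 sequential membership rescans by one pass over the words with a
-- keyword -> (rank, category) dictionary, keeping the hit of smallest rank (alternative decomposition).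


-- ===== PORT A =====
-- helper for A's two inner `for k in [...]` loops (first keyword found returns `res`)
def pvKwLoop (ks : List String) (res : String) (i : List String) : Option String :=
  match ks with
  | [] => none
  | k :: rest => if k ∈ i then some res else pvKwLoop rest res i

def typeline (curline : String) : String :=
  let i := PySem.Str.split₀ curline
  if "for" ∈ i then "for"
  else if "while" ∈ i then "while"
  else if "do" ∈ i then "do"
  else if "endif" ∈ i then "endif"
  else match pvKwLoop ["next", "endwhile", "endfunction", "endprocedure"] "end" i with
  | some r => r
  | none =>
    if "endswitch" ∈ i then "endswitch"
    else if "until" ∈ i then "until"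
    else if "if" ∈ i then "if"
    else if "elseif" ∈ i then "if"
    else if "else" ∈ i then "if"
    else if "switch" ∈ i then "switch"
    else if "case" ∈ i then "case"
    else match pvKwLoop ["function", "procedure"] "function" i with
    | some r => r
    | none => if "array" ∈ i then "array" else "stmt"

-- ===== PORT B =====
def pvKwPairs : List (String × Int × String) :=
  [("for", (0, "for")), ("while", (1, "while")), ("do", (2, "do")),
   ("endif", (3, "endif")), ("next", (4, "end")), ("endwhile", (5, "end")),
   ("endfunction", (6, "end")), ("endprocedure", (7, "end")),
   ("endswitch", (8, "endswitch")), ("until", (9, "until")),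
   ("if", (10, "if")), ("elseif", (11, "if")), ("else", (12, "if")),
   ("switch", (13, "switch")), ("case", (14, "case")),
   ("function", (15, "function")), ("procedure", (16, "function")),
   ("array", (17, "array"))]

def pvKW : PySem.Dict String (Int × String) := PySem.Dict.ofList pvKwPairs

def pvStep (best : Option (Int × String)) (w : String) : Option (Int × String) :=
  match PySem.Dict.get? pvKW w with
  | none => best
  | some hit =>
    match best with
    | none => some hit
    | some b => if hit.1 < b.1 then some hit else best

def typeline_alt (curline : String) : String :=
  match (PySem.Str.split₀ curline).foldl pvStep none with
  | some b => b.2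
  | none => "stmt"

-- ===== PRECONDITION & SPEC =====
def Spec_typeline (curline : String) (out : String) : Prop := out = typeline_alt curline
instance (curline : String) (out : String) : Decidable (Spec_typeline curline out) := by unfold Spec_typeline; infer_instance

-- ===== CLAIM (what is proved, stated in full; the proofs are below) =====
def Claim_equal_typeline : Prop := ∀ (curline : String), Dom_typeline curline → Spec_typeline curline (typeline curline)

-- ===== LEMMAS AND PROOFS =====
-- generic first-match lookup over an association list (the underlying Dict of B)
def glook (kl : List (String × Int × String)) (w : String) : Option (Int × String) :=
  (PySem.Dict.mk kl).get? w

def glStep (kl : List (String × Int × String)) (b : Option (Int × String)) (w : String) :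
    Option (Int × String) :=
  match glook kl w with
  | none => b
  | some hit =>
    match b with
    | none => some hit
    | some p => if hit.1 < p.1 then some hit else b

-- A's priority chain, abstracted over the keyword table
def chain : List (String × Int × String) → List String → String
  | [], _ => "stmt"
  | (k, _, c) :: rest, ws => if k ∈ ws then c else chain rest ws

theorem glook_mem {kl : List (String × Int × String)} {w : String} {p : Int × String}
    (h : glook kl w = some p) : ∃ k, (k, p) ∈ kl := by
  induction kl with
  | nil => simp [glook, PySem.Dict.get?] at h
  | cons e rest ih =>
    obtain ⟨k, v⟩ := e
    rw [glook, PySem.Dict.get?_mk_cons] at h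
    by_cases hk : k == w
    · simp [hk] at h; exact ⟨k, by simp [h]⟩
    · simp [hk] at h
      obtain ⟨k', hk'⟩ := ih h
      exact ⟨k', List.mem_cons_of_mem _ hk'⟩

theorem foldl_locked (kl : List (String × Int × String)) (r : Int) (c : String)
    (hmin : ∀ w p, glook kl w = some p → r ≤ p.1)
    (huniq : ∀ w p, glook kl w = some p → p.1 = r → p = (r, c)) :
    ∀ (ws : List String) (b : Option (Int × String)),
      (b = none ∨ ∃ q, b = some q ∧ r ≤ q.1 ∧ (q.1 = r → q = (r, c))) →
      ((∃ w ∈ ws, glook kl w = some (r, c)) ∨ b = some (r, c)) →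
      ws.foldl (glStep kl) b = some (r, c) := by
  intro ws
  induction ws with
  | nil =>
    intro b _ h2
    rcases h2 with ⟨w, hw, _⟩ | h2
    · exact absurd hw (List.not_mem_nil)
    · simpa using h2
  | cons w ws' ih =>
    intro b hb hpres
    rw [List.foldl_cons]
    have hstep : (glStep kl b w = none ∨
        ∃ q, glStep kl b w = some q ∧ r ≤ q.1 ∧ (q.1 = r → q = (r, c))) := by
      unfold glStep
      cases hl : glook kl w with
      | none => simpa using hb
      | some hit =>
        cases b with
        | none => exact Or.inr ⟨hit, rfl, hmin w hit hl, huniq w hit hl⟩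
        | some p =>
          by_cases hlt : hit.1 < p.1
          · simp only [hlt, if_true]
            exact Or.inr ⟨hit, rfl, hmin w hit hl, huniq w hit hl⟩
          · simp only [hlt, if_false]
            simpa using hb
    apply ih _ hstep
    rcases hpres with ⟨w', hw', hlook⟩ | hbrc
    · rcases List.mem_cons.mp hw' with rfl | hw'mem
      · -- the witness is processed now: the accumulator becomes (r, c)
        right
        unfold glStep
        rw [hlook]
        rcases hb with rfl | ⟨q, rfl, hrq, hqr⟩
        · rfl
        · by_cases hlt : r < q.1
          · simp [hlt]
          · have : q.1 = r := le_antisymm (not_lt.mp hlt) hrq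
            simp [hqr this]
      · exact Or.inl ⟨w', hw'mem, hlook⟩
    · right
      unfold glStep
      cases hl : glook kl w with
      | none => exact hbrc
      | some hit =>
        rw [hbrc]
        have hr := hmin w hit hl
        have : ¬ hit.1 < (r, c).1 := not_lt.mpr hr
        simp only [this, if_false]

theorem foldl_nil_dict : ∀ (ws : List String) (b : Option (Int × String)),
    ws.foldl (glStep []) b = b := by
  intro ws
  induction ws with
  | nil => intro b; rfl
  | cons w ws' ih =>
    intro b
    rw [List.foldl_cons]
    have : glStep [] b w = b := by
      unfold glStep glook
      simp [PySem.Dict.get?]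
    rw [this, ih]

theorem chain_eq_fold : ∀ (kl : List (String × Int × String)),
    List.Pairwise (fun a b => a.2.1 < b.2.1) kl →
    ∀ ws : List String,
      chain kl ws = (match ws.foldl (glStep kl) none with
                     | some b => b.2
                     | none => "stmt") := by
  intro kl
  induction kl with
  | nil => intro _ ws; rw [foldl_nil_dict]; rfl
  | cons e rest ih =>
    intro hp ws
    obtain ⟨k, r, c⟩ := e
    have hp' := (List.pairwise_cons.mp hp).2
    have hlb : ∀ b ∈ rest, r < b.2.1 := (List.pairwise_cons.mp hp).1
    by_cases hk : k ∈ ws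
    · have hmin : ∀ w p, glook ((k, r, c) :: rest) w = some p → r ≤ p.1 := by
        intro w p h
        rw [glook, PySem.Dict.get?_mk_cons] at h
        by_cases he : k == w
        · simp [he] at h; simp [← h]
        · simp [he] at h
          obtain ⟨k', hk'⟩ := glook_mem h
          exact le_of_lt (hlb (k', p) hk')
      have huniq : ∀ w p, glook ((k, r, c) :: rest) w = some p → p.1 = r → p = (r, c) := by
        intro w p h hpr
        rw [glook, PySem.Dict.get?_mk_cons] at h
        by_cases he : k == w
        · simp [he] at h; simp [← h]
        · simp [he] at h
          obtain ⟨k', hk'⟩ := glook_mem h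
          exact absurd hpr (ne_of_gt (hlb (k', p) hk'))
      have hfold := foldl_locked ((k, r, c) :: rest) r c hmin huniq ws none
        (Or.inl rfl)
        (Or.inl ⟨k, hk, by rw [glook, PySem.Dict.get?_mk_cons]; simp⟩)
      rw [chain]
      simp only [hk, if_true]
      rw [hfold]
    · have hcong : ws.foldl (glStep ((k, r, c) :: rest)) none = ws.foldl (glStep rest) none := by
        apply PySem.List.foldl_congr_mem
        intro acc x hx
        have hne : ¬ (k == x) := by
          simp only [beq_iff_eq]
          rintro rfl; exact hk hx
        unfold glStep glook
        rw [PySem.Dict.get?_mk_cons]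
        simp [hne]
      rw [chain]
      simp only [hk, if_false]
      rw [hcong]
      exact ih hp' ws

theorem pvKW_eq_mk : pvKW = PySem.Dict.mk pvKwPairs := by decide

theorem pvStep_eq_glStep : pvStep = glStep pvKwPairs := by
  funext b w
  unfold pvStep glStep glook
  rw [pvKW_eq_mk]

theorem typeline_eq_chain (ws : List String) :
    (if "for" ∈ ws then "for"
     else if "while" ∈ ws then "while"
     else if "do" ∈ ws then "do"
     else if "endif" ∈ ws then "endif"
     else match pvKwLoop ["next", "endwhile", "endfunction", "endprocedure"] "end" ws with
     | some r => r
     | none =>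
       if "endswitch" ∈ ws then "endswitch"
       else if "until" ∈ ws then "until"
       else if "if" ∈ ws then "if"
       else if "elseif" ∈ ws then "if"
       else if "else" ∈ ws then "if"
       else if "switch" ∈ ws then "switch"
       else if "case" ∈ ws then "case"
       else match pvKwLoop ["function", "procedure"] "function" ws with
       | some r => r
       | none => if "array" ∈ ws then "array" else "stmt") = chain pvKwPairs ws := by
  by_cases h1 : "for" ∈ ws
  · simp [pvKwPairs, chain, h1]
  by_cases h2 : "while" ∈ ws
  · simp [pvKwPairs, chain, h1, h2]
  by_cases h3 : "do" ∈ ws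
  · simp [pvKwPairs, chain, h1, h2, h3]
  by_cases h4 : "endif" ∈ ws
  · simp [pvKwPairs, chain, h1, h2, h3, h4]
  by_cases h5 : "next" ∈ ws
  · simp [pvKwLoop, pvKwPairs, chain, h1, h2, h3, h4, h5]
  by_cases h6 : "endwhile" ∈ ws
  · simp [pvKwLoop, pvKwPairs, chain, h1, h2, h3, h4, h5, h6]
  by_cases h7 : "endfunction" ∈ ws
  · simp [pvKwLoop, pvKwPairs, chain, h1, h2, h3, h4, h5, h6, h7]
  by_cases h8 : "endprocedure" ∈ ws
  · simp [pvKwLoop, pvKwPairs, chain, h1, h2, h3, h4, h5, h6, h7, h8]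
  by_cases h9 : "endswitch" ∈ ws
  · simp [pvKwLoop, pvKwPairs, chain, h1, h2, h3, h4, h5, h6, h7, h8, h9]
  by_cases h10 : "until" ∈ ws
  · simp [pvKwLoop, pvKwPairs, chain, h1, h2, h3, h4, h5, h6, h7, h8, h9, h10]
  by_cases h11 : "if" ∈ ws
  · simp [pvKwLoop, pvKwPairs, chain, h1, h2, h3, h4, h5, h6, h7, h8, h9, h10, h11]
  by_cases h12 : "elseif" ∈ ws
  · simp [pvKwLoop, pvKwPairs, chain, h1, h2, h3, h4, h5, h6, h7, h8, h9, h10, h11, h12]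
  by_cases h13 : "else" ∈ ws
  · simp [pvKwLoop, pvKwPairs, chain, h1, h2, h3, h4, h5, h6, h7, h8, h9, h10, h11, h12, h13]
  by_cases h14 : "switch" ∈ ws
  · simp [pvKwLoop, pvKwPairs, chain, h1, h2, h3, h4, h5, h6, h7, h8, h9, h10, h11, h12, h13, h14]
  by_cases h15 : "case" ∈ ws
  · simp [pvKwLoop, pvKwPairs, chain, h1, h2, h3, h4, h5, h6, h7, h8, h9, h10, h11, h12, h13, h14, h15]
  by_cases h16 : "function" ∈ ws
  · simp [pvKwLoop, pvKwPairs, chain, h1, h2, h3, h4, h5, h6, h7, h8, h9, h10, h11, h12, h13, h14, h15, h16]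
  by_cases h17 : "procedure" ∈ ws
  · simp [pvKwLoop, pvKwPairs, chain, h1, h2, h3, h4, h5, h6, h7, h8, h9, h10, h11, h12, h13, h14, h15, h16, h17]
  by_cases h18 : "array" ∈ ws
  · simp [pvKwLoop, pvKwPairs, chain, h1, h2, h3, h4, h5, h6, h7, h8, h9, h10, h11, h12, h13, h14, h15, h16, h17, h18]
  simp [pvKwLoop, pvKwPairs, chain, h1, h2, h3, h4, h5, h6, h7, h8, h9, h10, h11, h12, h13, h14, h15, h16, h17, h18]

-- ===== VERDICT (by name: the statement is the Claim_ definition above) =====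
theorem typeline_spec : Claim_equal_typeline := by
  intro curline _
  unfold Spec_typeline typeline typeline_alt
  rw [pvStep_eq_glStep]
  rw [typeline_eq_chain (PySem.Str.split₀ curline)]
  exact chain_eq_fold pvKwPairs (by decide) _
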